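-- pv_equiv track=rewrite | github.com/Sashkow/globe-of-ukraine-humankind-map-builder | terrain_mapper.py | get_hex_neighbors
-- ===== SOURCE A (Python) =====
-- def get_hex_neighbors(col: int, row: int, width: int, height: int) -> list:
--     """
--     Get neighboring hex coordinates in offset coordinate system (odd-r).
--
--     In odd-r offset coordinates, odd rows are shifted right by 0.5.
--     Returns list of (col, row) tuples for valid neighbors within bounds.
--
--     Neighbor directions (for reference):
--     - For even rows: NW(-1,-1), NE(0,-1), W(-1,0), E(+1,0), SW(-1,+1), SE(0,+1)
--     - For odd rows:  NW(0,-1), NE(+1,-1), W(-1,0), E(+1,0), SW(0,+1), SE(+1,+1)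
--     """
--     neighbors = []
--
--     if row % 2 == 0:  # Even row
--         offsets = [
--             (-1, -1), (0, -1),   # NW, NE
--             (-1, 0), (1, 0),     # W, E
--             (-1, 1), (0, 1),     # SW, SE
--         ]
--     else:  # Odd row
--         offsets = [
--             (0, -1), (1, -1),    # NW, NE
--             (-1, 0), (1, 0),     # W, E
--             (0, 1), (1, 1),      # SW, SE
--         ]
--
--     for dc, dr in offsets:
--         nc, nr = col + dc, row + dr
--         if 0 <= nc < width and 0 <= nr < height:
--             neighbors.append((nc, nr))
--
--     return neighbors
-- ===== SOURCE B (Python) =====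
-- CUBE_DIRS = ((0, -1), (1, -1), (-1, 0), (1, 0), (-1, 1), (0, 1))  # NW, NE, W, E, SW, SE in axial coords
--
-- def get_hex_neighbors(col: int, row: int, width: int, height: int) -> list:
--     # Convert odd-r offset -> axial, step in axial, convert back: no parity branching.
--     q = col - (row - row % 2) // 2
--     neighbors = []
--     for dq, dr in CUBE_DIRS:
--         nr = row + dr
--         nc = q + dq + (nr - nr % 2) // 2
--         if 0 <= nc < width and 0 <= nr < height:
--             neighbors.append((nc, nr))
--     return neighbors
-- ===== Notes on version B (the rewrite author's own statement) =====
-- stated objective: idiomatic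
-- what changed: Replaces the even/odd-row branch with two hardcoded delta tables by axial (cube) coordinates: convert the cell to axial once, add six fixed direction vectors, convert back to odd-r offset, so parity is absorbed into the conversion arithmetic.
import Mathlib
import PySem

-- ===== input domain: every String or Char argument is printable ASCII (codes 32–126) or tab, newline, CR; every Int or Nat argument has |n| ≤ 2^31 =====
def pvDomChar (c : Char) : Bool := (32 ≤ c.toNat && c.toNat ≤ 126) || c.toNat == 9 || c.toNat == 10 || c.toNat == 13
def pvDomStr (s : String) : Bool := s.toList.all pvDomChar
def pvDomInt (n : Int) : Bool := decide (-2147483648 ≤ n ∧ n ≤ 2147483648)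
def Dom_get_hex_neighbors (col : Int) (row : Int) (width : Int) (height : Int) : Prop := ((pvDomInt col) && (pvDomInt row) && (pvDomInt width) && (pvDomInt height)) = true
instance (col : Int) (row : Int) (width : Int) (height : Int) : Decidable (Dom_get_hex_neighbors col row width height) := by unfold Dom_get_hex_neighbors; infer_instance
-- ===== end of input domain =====

-- B replaces A's even/odd-row delta tables by an axial-coordinate round-trip (offset->axial, six fixed direction vectors, axial->offset); same result, no parity branch (objective: idiomatic).


-- ===== PORT A =====
def get_hex_neighbors (col : Int) (row : Int) (width : Int) (height : Int) : List (Int × Int) :=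
  let offsets : List (Int × Int) :=
    if PySem.Int.mod row 2 = 0 then
      [(-1, -1), (0, -1), (-1, 0), (1, 0), (-1, 1), (0, 1)]
    else
      [(0, -1), (1, -1), (-1, 0), (1, 0), (0, 1), (1, 1)]
  offsets.foldl (fun neighbors d =>
    let nc := col + d.1
    let nr := row + d.2
    if 0 ≤ nc ∧ nc < width ∧ 0 ≤ nr ∧ nr < height then neighbors ++ [(nc, nr)] else neighbors) []

-- ===== PORT B =====
-- the six axial direction vectors, in compass order NW, NE, W, E, SW, SE
def cubeDirs : List (Int × Int) := [(0, -1), (1, -1), (-1, 0), (1, 0), (-1, 1), (0, 1)]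

-- odd-r offset -> axial for the start cell, axial step, axial -> odd-r offset for the neighbor
def convNeighbor (col : Int) (row : Int) (d : Int × Int) : Int × Int :=
  let q := col - PySem.Int.floordiv (row - PySem.Int.mod row 2) 2
  let nr := row + d.2
  (q + d.1 + PySem.Int.floordiv (nr - PySem.Int.mod nr 2) 2, nr)

def get_hex_neighbors_alt (col : Int) (row : Int) (width : Int) (height : Int) : List (Int × Int) :=
  cubeDirs.foldl (fun neighbors d =>
    let p := convNeighbor col row d
    if 0 ≤ p.1 ∧ p.1 < width ∧ 0 ≤ p.2 ∧ p.2 < height then neighbors ++ [p] else neighbors) []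

-- ===== PRECONDITION & SPEC =====
def Spec_get_hex_neighbors (col : Int) (row : Int) (width : Int) (height : Int) (out : List (Int × Int)) : Prop := out = get_hex_neighbors_alt col row width height
instance (col : Int) (row : Int) (width : Int) (height : Int) (out : List (Int × Int)) : Decidable (Spec_get_hex_neighbors col row width height out) := by unfold Spec_get_hex_neighbors; infer_instance

-- ===== CLAIM (what is proved, stated in full; the proofs are below) =====
def Claim_equal_get_hex_neighbors : Prop := ∀ (col : Int) (row : Int) (width : Int) (height : Int), Dom_get_hex_neighbors col row width height → Spec_get_hex_neighbors col row width height (get_hex_neighbors col row width height)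

-- ===== LEMMAS AND PROOFS =====

-- ===== VERDICT (by name: the statement is the Claim_ definition above) =====
-- the common bounds-collecting fold, over an already-computed list of candidate cells
def collect (width height : Int) (ps : List (Int × Int)) : List (Int × Int) :=
  ps.foldl (fun neighbors p =>
    if 0 ≤ p.1 ∧ p.1 < width ∧ 0 ≤ p.2 ∧ p.2 < height then neighbors ++ [p] else neighbors) []

theorem A_as_collect (col row width height : Int) :
    get_hex_neighbors col row width height =
      collect width height ((if PySem.Int.mod row 2 = 0 then
          ([(-1, -1), (0, -1), (-1, 0), (1, 0), (-1, 1), (0, 1)] : List (Int × Int))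
        else
          [(0, -1), (1, -1), (-1, 0), (1, 0), (0, 1), (1, 1)]).map
        (fun d => (col + d.1, row + d.2))) := by
  simp only [get_hex_neighbors, collect, List.foldl_map]

theorem B_as_collect (col row width height : Int) :
    get_hex_neighbors_alt col row width height =
      collect width height (cubeDirs.map (convNeighbor col row)) := by
  simp only [get_hex_neighbors_alt, collect, List.foldl_map]

theorem maps_eq (col row : Int) :
    cubeDirs.map (convNeighbor col row) =
      (if PySem.Int.mod row 2 = 0 then
          ([(-1, -1), (0, -1), (-1, 0), (1, 0), (-1, 1), (0, 1)] : List (Int × Int))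
        else
          [(0, -1), (1, -1), (-1, 0), (1, 0), (0, 1), (1, 1)]).map
        (fun d => (col + d.1, row + d.2)) := by
  have h2 : (0 : Int) < 2 := by norm_num
  split_ifs with h <;>
    simp only [cubeDirs, convNeighbor, List.map, PySem.Int.floordiv_eq_ediv_of_pos h2,
      PySem.Int.mod_eq_emod_of_pos h2, List.cons.injEq, Prod.mk.injEq, and_true] <;>
    rw [PySem.Int.mod_eq_emod_of_pos h2] at h <;> omega

theorem get_hex_neighbors_spec : Claim_equal_get_hex_neighbors := by
  intro col row width height _
  unfold Spec_get_hex_neighbors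
  rw [A_as_collect, B_as_collect, maps_eq]
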